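-- pv_equiv track=rewrite | github.com/raghavsaboo/coding_exercises | dynamic_programming/linear_sequences/non_constant_transition/partition_array_for_maximum_sum/solution.py | max_sum_after_partitioning_top_down
-- ===== SOURCE A (Python) =====
-- def max_sum_after_partitioning_top_down(arr, k):
--     memo = {}
--
--     def partition_helper(start):
--         if start >= len(arr):
--             return 0
--         if start in memo:
--             return memo[start]
--         max_val = float('-inf')
--         max_sum = float('-inf')
--         for i in range(start, min(start + k, len(arr))):
--             max_val = max(max_val, arr[i])
--             current_sum = max_val * (i - start + 1) + partition_helper(i + 1)
--             max_sum = max(max_sum, current_sum)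
--         memo[start] = max_sum
--         return max_sum
--
--     return partition_helper(0)
-- ===== SOURCE B (Python) =====
-- def max_sum_after_partitioning_top_down(arr, k):
--     n = len(arr)
--     dp = [0] * (n + 1)
--     for i in range(n - 1, -1, -1):
--         mv = arr[i]
--         best = mv + dp[i + 1]
--         for j in range(i + 1, min(i + k, n)):
--             if arr[j] > mv:
--                 mv = arr[j]
--             cand = mv * (j - i + 1) + dp[j + 1]
--             if cand > best:
--                 best = cand
--         dp[i] = best
--     return dp[0]
-- ===== Notes on version B (the rewrite author's own statement) =====
-- stated objective: alternative
-- what changed: Replaces A's memoized top-down recursion (helper + memo dict) with an iterative bottom-up DP table filled right-to-left with a running window maximum; same O(n*k) work.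
-- outside the precondition, e.g. on max_sum_after_partitioning_top_down([1], 0): A returns -inf, B returns 1
import Mathlib
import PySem

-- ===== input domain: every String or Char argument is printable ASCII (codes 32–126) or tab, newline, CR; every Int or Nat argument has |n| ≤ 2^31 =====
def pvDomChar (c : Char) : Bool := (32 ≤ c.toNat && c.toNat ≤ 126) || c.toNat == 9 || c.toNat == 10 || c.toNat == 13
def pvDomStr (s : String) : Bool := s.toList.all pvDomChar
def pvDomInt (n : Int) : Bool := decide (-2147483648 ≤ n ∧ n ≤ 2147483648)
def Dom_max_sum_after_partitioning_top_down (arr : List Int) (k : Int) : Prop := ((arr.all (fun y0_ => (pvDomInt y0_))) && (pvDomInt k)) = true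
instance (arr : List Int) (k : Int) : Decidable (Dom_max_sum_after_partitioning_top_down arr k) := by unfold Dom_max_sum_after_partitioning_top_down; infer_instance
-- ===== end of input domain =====

-- B replaces A's memoized top-down recursion by an iterative bottom-up DP table (objective: alternative decomposition).

-- ===== PORT A =====
-- A's helper returns either an int or float('-inf') (when its window loop is empty);
-- we model that value as Option Int with none = -inf.  The memo dict stores these values.
-- The explicit Nat fuel only makes the recursion total: each nested call is at a strictly
-- larger start, so fuel = arr.length + 1 is never exhausted from the top-level call.
-- Python's max against a possible float('-inf') (none)
def pvMaxO (mv : Option Int) (a : Int) : Int :=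
  match mv with
  | none => a
  | some v => max v a

def pvOmax (ms c : Option Int) : Option Int :=
  match ms, c with
  | none, c => c
  | some b, none => some b
  | some b, some c => some (max b c)

mutual
def pvAgo (arr : List Int) (k : Int) (fuel : Nat) (start : Int)
    (memo : PySem.Dict Int (Option Int)) : Option Int × PySem.Dict Int (Option Int) :=
  match fuel with
  | 0 => (some 0, memo)          -- unreachable guard
  | fuel + 1 =>
    if (arr.length : Int) ≤ start then (some 0, memo)
    else
      match memo.get? start with
      | some v => (v, memo)
      | none =>
        let r := pvAloop arr k fuel start
          (PySem.List.pyRange start (min (start + k) (arr.length : Int)) 1) none none memo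
        (r.2.1, r.2.2.insert start r.2.1)
termination_by (fuel, 0)

def pvAloop (arr : List Int) (k : Int) (fuel : Nat) (start : Int) (idxs : List Int)
    (mv ms : Option Int) (memo : PySem.Dict Int (Option Int)) :
    Option Int × Option Int × PySem.Dict Int (Option Int) :=
  match idxs with
  | [] => (mv, ms, memo)
  | i :: rest =>
    let a := PySem.List.pyGetD arr i 0      -- i is always a valid index here: exact
    let mv' : Int := pvMaxO mv a            -- max(-inf, x) = x
    let r := pvAgo arr k fuel (i + 1) memo
    let cur : Option Int := r.1.map (fun rv => mv' * (i - start + 1) + rv)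
    let ms' : Option Int := pvOmax ms cur
    pvAloop arr k fuel start rest (some mv') ms' r.2
termination_by (fuel, idxs.length + 1)
end

-- Python returns the helper's value, an int whenever Pre_ holds (the Option is some); .getD 0 only unwraps it.
def max_sum_after_partitioning_top_down (arr : List Int) (k : Int) : Int :=
  ((pvAgo arr k (arr.length + 1) 0 PySem.Dict.empty).1).getD 0

-- ===== PORT B =====
def max_sum_after_partitioning_top_down_alt (arr : List Int) (k : Int) : Int :=
  let n : Int := arr.length
  let dp0 : List Int := List.replicate (arr.length + 1) 0
  let dp := (PySem.List.pyRange (n - 1) (-1) (-1)).foldl (fun dp i =>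
      let mv := PySem.List.pyGetD arr i 0
      let best := mv + PySem.List.pyGetD dp (i + 1) 0
      let r := (PySem.List.pyRange (i + 1) (min (i + k) n) 1).foldl (fun (p : Int × Int) j =>
          let a := PySem.List.pyGetD arr j 0
          let mv := if a > p.1 then a else p.1
          let cand := mv * (j - i + 1) + PySem.List.pyGetD dp (j + 1) 0
          (mv, if cand > p.2 then cand else p.2)) (mv, best)
      dp.set i.toNat r.2) dp0   -- i ≥ 0 throughout the loop, so .toNat is exact
  PySem.List.pyGetD dp 0 0

-- ===== PRECONDITION & SPEC =====
-- Pre_ excludes nonempty arr with k ≤ 0: there A's window loop is empty and A returns the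
-- float('-inf') sentinel, which is not an int.
def Pre_max_sum_after_partitioning_top_down (arr : List Int) (k : Int) : Prop := arr = [] ∨ 1 ≤ k
instance (arr : List Int) (k : Int) : Decidable (Pre_max_sum_after_partitioning_top_down arr k) := by unfold Pre_max_sum_after_partitioning_top_down; infer_instance
def pvWitness_max_sum_after_partitioning_top_down : List Int × Int := ([1, 15, 7, 9, 2, 5, 10], 3)

def Spec_max_sum_after_partitioning_top_down (arr : List Int) (k : Int) (out : Int) : Prop := out = max_sum_after_partitioning_top_down_alt arr k
instance (arr : List Int) (k : Int) (out : Int) : Decidable (Spec_max_sum_after_partitioning_top_down arr k out) := by unfold Spec_max_sum_after_partitioning_top_down; infer_instance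

-- ===== CLAIM (what is proved, stated in full; the proofs are below) =====
def Claim_equal_max_sum_after_partitioning_top_down : Prop := ∀ (arr : List Int) (k : Int), Dom_max_sum_after_partitioning_top_down arr k → Pre_max_sum_after_partitioning_top_down arr k → Spec_max_sum_after_partitioning_top_down arr k (max_sum_after_partitioning_top_down arr k)

-- ===== LEMMAS AND PROOFS =====

-- Specification value: pvV k s is the list of optimal values of every suffix of s
-- (first entry = the whole suffix s, last entry = 0 for the empty suffix).
-- pvW is the shared window fold both inner loops compute.
def pvW : List (Int × Int) → Int → Int → Int → Int
  | [], _, _, best => best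
  | (y, d) :: rest, mv, t, best =>
    let mv' := if y > mv then y else mv
    let cand := mv' * t + d
    pvW rest mv' (t + 1) (if cand > best then cand else best)

def pvV (k : Int) : List Int → List Int
  | [] => [0]
  | x :: s =>
    let dp := pvV k s
    pvW ((s.zip (dp.drop 1)).take (k - 1).toNat) x 2 (x + dp.headI) :: dp

theorem pvV_length (k : Int) (s : List Int) : (pvV k s).length = s.length + 1 := by
  induction s with
  | nil => rfl
  | cons x s ih => simp [pvV, ih]

theorem pvV_drop (k : Int) (s : List Int) (m : Nat) :
    (pvV k s).drop m = if m ≤ s.length then pvV k (s.drop m) else [] := by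
  induction s generalizing m with
  | nil =>
    cases m with
    | zero => simp [pvV]
    | succ m => simp [pvV]
  | cons x s ih =>
    cases m with
    | zero => simp
    | succ m =>
      have : (pvV k (x :: s)).drop (m + 1) = (pvV k s).drop m := by
        simp [pvV]
      rw [this, ih]
      simp

theorem pvV_headI_cons (k : Int) (t : List Int) : pvV k t = (pvV k t).headI :: (pvV k t).drop 1 := by
  cases t <;> simp [pvV]

theorem pvZip_step (arr : List Int) (k : Int) (m : Nat) :
    (arr.drop m).zip ((pvV k (arr.drop m)).drop 1) = (arr.drop m).zip (pvV k (arr.drop (m + 1))) := by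
  by_cases hnil : arr.drop m = []
  · simp [hnil]
  · have hlen : 1 ≤ (arr.drop m).length := by
      rcases List.length_pos_iff.mpr hnil with h
      omega
    have h1 : (pvV k (arr.drop m)).drop 1 = pvV k (arr.drop (m + 1)) := by
      rw [pvV_drop, if_pos hlen, List.drop_drop, Nat.add_comm]
    rw [h1]

-- shared step: the window value pvW computes at index M is the head of pvV at M
theorem pvVal_step (arr : List Int) (k : Int) (M : Nat) (hMn : M < arr.length) (L : Nat)
    (hLint : ((M : Int) + 1) + (L : Int) = min ((M : Int) + k) (arr.length : Int)) :
    pvW (((arr.drop (M + 1)).zip (pvV k (arr.drop (M + 1 + 1)))).take L) arr[M] 2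
        (arr[M] + (pvV k (arr.drop (M + 1))).headI)
      = (pvV k (arr.drop M)).headI := by
  have hdropM : arr.drop M = arr[M] :: arr.drop (M + 1) := List.drop_eq_getElem_cons hMn
  rw [hdropM]
  rw [pvV]
  simp only [List.headI]
  rw [← pvZip_step arr k (M + 1)]
  congr 1
  rw [List.take_eq_take_iff]
  have hz : ((arr.drop (M + 1)).zip ((pvV k (arr.drop (M + 1))).drop 1)).length
      = arr.length - (M + 1) := by
    simp [List.length_zip, pvV_length]
  rw [hz]
  omega

theorem pvB_win (arr : List Int) (k : Int) (dp : List Int) (i : Int) (hi : 0 ≤ i)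
    (Hdp : ∀ jj : Nat, i < (jj : Int) → jj ≤ arr.length →
      dp[jj]? = some ((pvV k (arr.drop jj)).headI)) :
    ∀ (L : Nat) (j : Int), i < j → j + L ≤ (arr.length : Int) → ∀ mvv best : Int,
    ((PySem.List.pyRange j (j + L) 1).foldl (fun (p : Int × Int) j' =>
        let a := PySem.List.pyGetD arr j' 0
        let mv := if a > p.1 then a else p.1
        let cand := mv * (j' - i + 1) + PySem.List.pyGetD dp (j' + 1) 0
        (mv, if cand > p.2 then cand else p.2)) (mvv, best)).2
      = pvW (((arr.drop j.toNat).zip (pvV k (arr.drop (j.toNat + 1)))).take L) mvv (j - i + 1) best := by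
  intro L
  induction L with
  | zero =>
    intro j hj hjn mvv best
    rw [show ((0 : Nat) : Int) = 0 by rfl]
    rw [PySem.List.pyRange_one_eq_nil (by omega)]
    simp [pvW]
  | succ L ih =>
    intro j hj hjn mvv best
    have hj0 : 0 ≤ j := by omega
    have hjlt : j < (arr.length : Int) := by push_cast at hjn ⊢; omega
    have hjtn : j.toNat < arr.length := by omega
    rw [PySem.List.pyRange_one_cons (by push_cast; omega : j < j + ((L + 1 : Nat) : Int))]
    rw [List.foldl_cons]
    have hrange : j + ((L + 1 : Nat) : Int) = (j + 1) + (L : Nat) := by push_cast; ring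
    have ha : PySem.List.pyGetD arr j 0 = arr[j.toNat] :=
      PySem.List.pyGetD_eq_getElem arr 0 hj0 hjlt
    have hd : PySem.List.pyGetD dp (j + 1) 0 = (pvV k (arr.drop (j.toNat + 1))).headI := by
      have h1 : PySem.List.pyGetD dp (j + 1) 0 = dp.getD (j + 1).toNat 0 :=
        PySem.List.pyGetD_of_nonneg dp 0 (by omega)
      have h2 : (j + 1).toNat = j.toNat + 1 := by omega
      have h3 := Hdp (j.toNat + 1) (by omega) (by omega)
      rw [h1, h2, List.getD, h3]
      rfl
    -- decompose the spec-side pairs list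
    have hdropj : arr.drop j.toNat = arr[j.toNat] :: arr.drop (j.toNat + 1) :=
      List.drop_eq_getElem_cons hjtn
    have hpv : pvV k (arr.drop (j.toNat + 1)) =
        (pvV k (arr.drop (j.toNat + 1))).headI :: (pvV k (arr.drop (j.toNat + 1))).drop 1 :=
      pvV_headI_cons k _
    conv_rhs => rw [hdropj, hpv, List.zip_cons_cons]
    rw [pvZip_step arr k (j.toNat + 1)]
    rw [List.take_succ_cons]
    rw [pvW]
    simp only [ha, hd, hrange]
    rw [ih (j + 1) (by omega) (by push_cast at hjn ⊢; omega)]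
    have hjt1 : (j + 1).toNat = j.toNat + 1 := by omega
    rw [hjt1]
    congr 1
    omega
theorem pvB_outer (arr : List Int) (k : Int) (hk : 1 ≤ k) :
    ∀ (M : Nat), M ≤ arr.length → ∀ dp : List Int, dp.length = arr.length + 1 →
    (∀ jj : Nat, M ≤ jj → jj ≤ arr.length → dp[jj]? = some ((pvV k (arr.drop jj)).headI)) →
    ∀ jj : Nat, jj ≤ arr.length →
    ((PySem.List.pyRange ((M : Int) - 1) (-1) (-1)).foldl (fun dp i =>
        let mv := PySem.List.pyGetD arr i 0
        let best := mv + PySem.List.pyGetD dp (i + 1) 0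
        let r := (PySem.List.pyRange (i + 1) (min (i + k) (arr.length : Int)) 1).foldl
          (fun (p : Int × Int) j =>
            let a := PySem.List.pyGetD arr j 0
            let mv := if a > p.1 then a else p.1
            let cand := mv * (j - i + 1) + PySem.List.pyGetD dp (j + 1) 0
            (mv, if cand > p.2 then cand else p.2)) (mv, best)
        dp.set i.toNat r.2) dp)[jj]?
      = some ((pvV k (arr.drop jj)).headI) := by
  intro M
  induction M with
  | zero =>
    intro _ dp hlen Hdp jj hjj
    rw [show ((0 : Nat) : Int) - 1 = -1 by rfl]
    rw [PySem.List.pyRange_neg_one_eq_nil (le_refl _)]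
    exact Hdp jj (Nat.zero_le _) hjj
  | succ M ih =>
    intro hM dp hlen Hdp jj hjj
    have hMn : M < arr.length := by omega
    have hcast : ((M + 1 : Nat) : Int) - 1 = (M : Int) := by push_cast; ring
    rw [hcast, PySem.List.pyRange_neg_one_cons (by omega : (-1 : Int) < (M : Int))]
    rw [List.foldl_cons]
    -- evaluate the body at i = M
    have hmv : PySem.List.pyGetD arr (M : Int) 0 = arr[M] := by
      have := PySem.List.pyGetD_eq_getElem arr (i := (M : Int)) 0 (by omega) (by omega)
      simpa using this
    have hbest : PySem.List.pyGetD dp ((M : Int) + 1) 0 = (pvV k (arr.drop (M + 1))).headI := by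
      have h1 : PySem.List.pyGetD dp ((M : Int) + 1) 0 = dp.getD ((M : Int) + 1).toNat 0 :=
        PySem.List.pyGetD_of_nonneg dp 0 (by omega)
      have h2 : ((M : Int) + 1).toNat = M + 1 := by omega
      have h3 := Hdp (M + 1) (by omega) (by omega)
      rw [h1, h2, List.getD, h3]; rfl
    have hL : ∃ L : Nat, min ((M : Int) + k) (arr.length : Int) = ((M : Int) + 1) + (L : Int) ∧
        ((M : Int) + 1) + (L : Int) ≤ (arr.length : Int) := by
      refine ⟨(min ((M : Int) + k) (arr.length : Int) - ((M : Int) + 1)).toNat, ?_, ?_⟩ <;> omega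
    obtain ⟨L, hLeq, hLle⟩ := hL
    have hwin := pvB_win arr k dp (M : Int) (by omega)
      (fun jj' hjj1 hjj2 => Hdp jj' (by omega) hjj2) L ((M : Int) + 1) (by omega)
      (by omega)
    have hMt : ((M : Int) + 1).toNat = M + 1 := by omega
    refine ih (by omega) _ ?_ ?_ jj hjj
    · simp [hlen]
    · intro jj' h1 h2
      simp only [Int.toNat_natCast]
      by_cases hjm : jj' = M
      · rw [hjm]
        rw [List.getElem?_set_self (by omega)]
        rw [hLeq]
        rw [hMt] at hwin
        rw [hwin]
        have ht2 : ((M : Int) + 1) - (M : Int) + 1 = 2 := by ring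
        rw [ht2, hmv, hbest]
        rw [pvVal_step arr k M hMn L (by omega)]
      · rw [List.getElem?_set_ne (by omega)]
        exact Hdp jj' (by omega) h2
theorem pvB_main (arr : List Int) (k : Int) (hk : 1 ≤ k) :
    max_sum_after_partitioning_top_down_alt arr k = (pvV k arr).headI := by
  have hent : ∀ jj : Nat, arr.length ≤ jj → jj ≤ arr.length →
      (List.replicate (arr.length + 1) (0 : Int))[jj]? = some ((pvV k (arr.drop jj)).headI) := by
    intro jj h1 h2
    have hj : jj = arr.length := le_antisymm h2 h1
    subst hj
    rw [List.getElem?_replicate, if_pos (by omega), List.drop_length]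
    rfl
  have h := pvB_outer arr k hk arr.length (le_refl _) _ (by simp) hent 0 (Nat.zero_le _)
  rw [List.drop_zero] at h
  unfold max_sum_after_partitioning_top_down_alt
  dsimp only
  dsimp only at h
  rw [PySem.List.pyGetD_of_nonneg _ _ (le_refl 0), List.getD, Int.toNat_zero, h]
  rfl
def pvInv (arr : List Int) (k : Int) (memo : PySem.Dict Int (Option Int)) : Prop :=
  ∀ s v, memo.get? s = some v → v = some ((pvV k (arr.drop s.toNat)).headI)

theorem pvMax_ite (x y : Int) : max x y = if y > x then y else x := by
  rw [max_def]; split_ifs <;> omega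

theorem pvA_loop (arr : List Int) (k : Int) (start : Int) (fuel : Nat)
    (IH : ∀ st : Int, 0 ≤ st → st ≤ arr.length → (arr.length : Int) - st < fuel →
      ∀ memo, pvInv arr k memo →
        (pvAgo arr k fuel st memo).1 = some ((pvV k (arr.drop st.toNat)).headI) ∧
        pvInv arr k (pvAgo arr k fuel st memo).2)
    (hs0 : 0 ≤ start) (hfuel : (arr.length : Int) - start ≤ fuel) :
    ∀ (L : Nat) (j : Int), start < j → j + L ≤ (arr.length : Int) →
      ∀ (mvv best : Int) (memo : PySem.Dict Int (Option Int)), pvInv arr k memo →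
      (pvAloop arr k fuel start (PySem.List.pyRange j (j + L) 1) (some mvv) (some best) memo).2.1
        = some (pvW (((arr.drop j.toNat).zip (pvV k (arr.drop (j.toNat + 1)))).take L)
            mvv (j - start + 1) best)
      ∧ pvInv arr k
          (pvAloop arr k fuel start (PySem.List.pyRange j (j + L) 1) (some mvv) (some best) memo).2.2 := by
  intro L
  induction L with
  | zero =>
    intro j hj hjn mvv best memo hm
    rw [show ((0 : Nat) : Int) = 0 by rfl, PySem.List.pyRange_one_eq_nil (by omega)]
    rw [pvAloop]
    exact ⟨by simp [pvW], hm⟩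
  | succ L ih =>
    intro j hj hjn mvv best memo hm
    have hj0 : 0 ≤ j := by omega
    have hjlt : j < (arr.length : Int) := by push_cast at hjn ⊢; omega
    have hjtn : j.toNat < arr.length := by omega
    rw [PySem.List.pyRange_one_cons (by push_cast; omega : j < j + ((L + 1 : Nat) : Int))]
    rw [pvAloop]
    have hIH := IH (j + 1) (by omega) (by omega) (by omega) memo hm
    have ha : PySem.List.pyGetD arr j 0 = arr[j.toNat] :=
      PySem.List.pyGetD_eq_getElem arr 0 hj0 hjlt
    rw [ha, hIH.1]
    have hrange : j + ((L + 1 : Nat) : Int) = (j + 1) + (L : Nat) := by push_cast; ring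
    rw [hrange]
    simp only [pvMaxO, pvOmax]
    have hrec := ih (j + 1) (by omega) (by push_cast at hjn ⊢; omega)
      (max mvv arr[j.toNat])
      (max best (max mvv arr[j.toNat] * (j - start + 1) + (pvV k (arr.drop ((j + 1).toNat))).headI))
      (pvAgo arr k fuel (j + 1) memo).2 hIH.2
    simp only [Option.map_some] at *
    refine ⟨?_, hrec.2⟩
    rw [hrec.1]
    -- match the spec side
    have hdropj : arr.drop j.toNat = arr[j.toNat] :: arr.drop (j.toNat + 1) :=
      List.drop_eq_getElem_cons hjtn
    have hpv : pvV k (arr.drop (j.toNat + 1)) =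
        (pvV k (arr.drop (j.toNat + 1))).headI :: (pvV k (arr.drop (j.toNat + 1))).drop 1 :=
      pvV_headI_cons k _
    conv_rhs => rw [hdropj, hpv, List.zip_cons_cons]
    rw [pvZip_step arr k (j.toNat + 1)]
    rw [List.take_succ_cons]
    rw [pvW]
    have hjt1 : (j + 1).toNat = j.toNat + 1 := by omega
    rw [hjt1]
    simp only [pvMax_ite]
    have ht : j + 1 - start + 1 = j - start + 1 + 1 := by ring
    rw [ht]
theorem pvA_main (arr : List Int) (k : Int) (hk : 1 ≤ k) :
    ∀ fuel : Nat, ∀ start : Int, 0 ≤ start → start ≤ arr.length →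
      (arr.length : Int) - start < fuel →
      ∀ memo, pvInv arr k memo →
        (pvAgo arr k fuel start memo).1 = some ((pvV k (arr.drop start.toNat)).headI) ∧
        pvInv arr k (pvAgo arr k fuel start memo).2 := by
  intro fuel
  induction fuel with
  | zero =>
    intro start h0 h1 h2 memo hm
    exfalso
    simp at h2
    omega
  | succ fuel ihf =>
    intro start h0' h1' h2' memo hm
    obtain ⟨M, rfl⟩ : ∃ M : Nat, start = (M : Int) := ⟨start.toNat, (Int.toNat_of_nonneg h0').symm⟩
    rw [pvAgo]
    by_cases hge : (arr.length : Int) ≤ (M : Int)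
    · rw [if_pos hge]
      have hMt : (M : Int).toNat = arr.length := by omega
      rw [hMt, List.drop_length]
      exact ⟨rfl, hm⟩
    · rw [if_neg hge]
      have hMn : M < arr.length := by omega
      cases hmm : memo.get? (M : Int) with
      | some v =>
        exact ⟨hm _ v hmm, hm⟩
      | none =>
        have hLex : ∃ L : Nat, ((M : Int) + 1) + (L : Int) = min ((M : Int) + k) (arr.length : Int) :=
          ⟨(min ((M : Int) + k) (arr.length : Int) - ((M : Int) + 1)).toNat, by omega⟩
        obtain ⟨L, hLint⟩ := hLex
        have hcons : PySem.List.pyRange (M : Int) (min ((M : Int) + k) (arr.length : Int)) 1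
            = (M : Int) :: PySem.List.pyRange ((M : Int) + 1) (((M : Int) + 1) + (L : Int)) 1 := by
          rw [← hLint]
          exact PySem.List.pyRange_one_cons (by omega)
        rw [hcons, pvAloop]
        have ha : PySem.List.pyGetD arr (M : Int) 0 = arr[M] := by
          have := PySem.List.pyGetD_eq_getElem arr (i := (M : Int)) 0 (by omega) (by omega)
          simpa using this
        have hIH := ihf ((M : Int) + 1) (by omega) (by omega) (by omega) memo hm
        rw [ha, hIH.1]
        simp only [pvMaxO, pvOmax, Option.map_some]
        have hMt1 : ((M : Int) + 1).toNat = M + 1 := by omega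
        rw [hMt1]
        have hb : arr[M] * ((M : Int) - (M : Int) + 1) + (pvV k (arr.drop (M + 1))).headI
            = arr[M] + (pvV k (arr.drop (M + 1))).headI := by ring
        rw [hb]
        have hloop := pvA_loop arr k (M : Int) fuel ihf (by omega) (by omega) L ((M : Int) + 1)
          (by omega) (by omega)
          arr[M] (arr[M] + (pvV k (arr.drop (M + 1))).headI)
          (pvAgo arr k fuel ((M : Int) + 1) memo).2 hIH.2
        rw [hMt1] at hloop
        rw [hloop.1]
        have ht2 : ((M : Int) + 1) - (M : Int) + 1 = 2 := by ring
        rw [ht2]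
        rw [pvVal_step arr k M hMn L hLint]
        simp only [Int.toNat_natCast]
        refine ⟨trivial, ?_⟩
        intro s v hsv
        rw [PySem.Dict.get?_insert] at hsv
        by_cases hs : s = (M : Int)
        · rw [if_pos hs] at hsv
          injection hsv with h
          subst hs
          simp only [Int.toNat_natCast]
          exact h.symm
        · rw [if_neg hs] at hsv
          exact hloop.2 s v hsv

-- ===== VERDICT (by name: the statement is the Claim_ definition above) =====
theorem max_sum_after_partitioning_top_down_spec : Claim_equal_max_sum_after_partitioning_top_down := by
  intro arr k _ hpre
  unfold Spec_max_sum_after_partitioning_top_down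
  rcases hpre with h | hk
  · subst h
    simp [max_sum_after_partitioning_top_down, max_sum_after_partitioning_top_down_alt,
      pvAgo, PySem.List.pyRange_neg_one_eq_nil (le_refl (-1 : Int)), PySem.List.pyGetD]
  · have h := pvA_main arr k hk (arr.length + 1) 0 (le_refl 0) (Int.natCast_nonneg _)
      (by push_cast; omega) PySem.Dict.empty
      (by intro s v hv; simp [PySem.Dict.get?_empty] at hv)
    unfold max_sum_after_partitioning_top_down
    rw [h.1, pvB_main arr k hk]
    simp
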